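-- pv_equiv track=rewrite | github.com/psousa50/statements | bank-statement-api/src/app/services/file_processing/transaction_cleaner.py | _create_reverse_map
-- ===== SOURCE A (Python) =====
-- from typing import Dict, List, Optional
--
-- def _create_reverse_map(column_map: Dict[str, str]) -> Dict[str, List[str]]:
--     """
--     Create a reverse mapping from standard column names to original column names.
--
--     Args:
--         column_map: Mapping of original column names to standard column names
--
--     Returns:
--         Dictionary mapping standard column names to lists of original column names
--     """
--     reverse_map = {}
--     for orig_col, std_col in column_map.items():
--         if std_col:  # Skip empty strings
--             if std_col not in reverse_map:
--                 reverse_map[std_col] = []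
--             reverse_map[std_col].append(orig_col)
--     return reverse_map
-- ===== SOURCE B (Python) =====
-- def _create_reverse_map(column_map):
--     """Reverse map via ordered-dedup of standard names, then one comprehension per name."""
--     order = dict.fromkeys(s for s in column_map.values() if s)
--     return {s: [o for o, t in column_map.items() if t == s] for s in order}
-- ===== Notes on version B (the rewrite author's own statement) =====
-- stated objective: idiomatic
-- what changed: Replaces the incremental check-key-then-append dict-of-lists loop by an ordered dedup of the non-empty standard names (dict.fromkeys) followed by a dict comprehension that collects, per standard name, the matching original names in one filtering pass.
import Mathlib
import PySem

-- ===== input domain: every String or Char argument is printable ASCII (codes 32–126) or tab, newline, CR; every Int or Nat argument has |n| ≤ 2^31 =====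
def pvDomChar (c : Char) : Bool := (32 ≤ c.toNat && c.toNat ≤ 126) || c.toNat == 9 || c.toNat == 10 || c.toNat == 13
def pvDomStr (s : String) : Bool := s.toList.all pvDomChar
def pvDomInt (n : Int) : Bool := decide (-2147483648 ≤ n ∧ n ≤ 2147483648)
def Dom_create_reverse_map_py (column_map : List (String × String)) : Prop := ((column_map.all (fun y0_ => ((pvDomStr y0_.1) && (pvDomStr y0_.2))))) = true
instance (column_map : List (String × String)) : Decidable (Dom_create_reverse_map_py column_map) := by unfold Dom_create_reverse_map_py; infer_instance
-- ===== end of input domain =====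

-- B replaces A's incremental dict-of-lists loop by dedup-the-names then one filtering pass per name (idiomatic; same results, including order).

-- ===== PORT A =====
def create_reverse_map_py (column_map : List (String × String)) : List (String × List String) :=
  (column_map.foldl
    (fun reverse_map p =>
      if p.2 ≠ "" then
        let rm1 := if reverse_map.contains p.2 then reverse_map
                   else reverse_map.insert p.2 ([] : List String)
        rm1.modify p.2 [] (fun l => l ++ [p.1])   -- reverse_map[std_col].append(orig_col)
      else reverse_map)
    (PySem.Dict.empty : PySem.Dict String (List String))).items

-- ===== PORT B =====
def create_reverse_map_py_alt (column_map : List (String × String)) : List (String × List String) :=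
  let order := PySem.List.dedup ((column_map.map (fun p => p.2)).filter (fun s => s ≠ ""))
  order.map (fun s => (s, (column_map.filter (fun p => p.2 == s)).map (fun p => p.1)))

-- ===== PRECONDITION & SPEC =====
def Spec_create_reverse_map_py (column_map : List (String × String)) (out : List (String × List String)) : Prop := out = create_reverse_map_py_alt column_map
instance (column_map : List (String × String)) (out : List (String × List String)) : Decidable (Spec_create_reverse_map_py column_map out) := by unfold Spec_create_reverse_map_py; infer_instance

-- ===== CLAIM (what is proved, stated in full; the proofs are below) =====
def Claim_equal_create_reverse_map_py : Prop := ∀ (column_map : List (String × String)), Dom_create_reverse_map_py column_map → Spec_create_reverse_map_py column_map (create_reverse_map_py column_map)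

-- ===== LEMMAS AND PROOFS =====

-- inserting twice at the same fresh key is the same as inserting once
theorem insert_insert_self_of_not_contains {κ ν : Type} [BEq κ] [LawfulBEq κ]
    (d : PySem.Dict κ ν) (k : κ) (v' v : ν) (h : d.contains k = false) :
    (d.insert k v').insert k v = d.insert k v := by
  have h2 : (d.insert k v').contains k = true := PySem.Dict.contains_insert_self d k v'
  have hmap : d.items.map (fun p => if p.1 == k then (k, v) else p) = d.items := by
    have : ∀ p ∈ d.items, (fun p => if p.1 == k then (k, v) else p) p = id p := by
      intro p hp
      have : (p.1 == k) = false := by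
        cases hbk : p.1 == k
        · rfl
        · have hc : d.contains k = true := by
            simp only [PySem.Dict.contains]
            exact List.any_eq_true.2 ⟨p, hp, hbk⟩
          rw [h] at hc
          cases hc
      simp [this]
    rw [List.map_congr_left this, List.map_id]
  simp only [PySem.Dict.insert, h2, h, Bool.false_eq_true, if_false]
  rw [List.map_append, hmap]
  simp

-- A's step (ensure-key-then-append) is a single Python d.modify
theorem stepA_eq (d : PySem.Dict String (List String)) (p : String × String) :
    (if d.contains p.2 then d else d.insert p.2 ([] : List String)).modify p.2 []
        (fun l => l ++ [p.1])
    = d.modify p.2 [] (fun l => l ++ [p.1]) := by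
  by_cases h : d.contains p.2
  · simp [h]
  · have h' : d.contains p.2 = false := by simpa using h
    simp only [h', Bool.false_eq_true, if_false, PySem.Dict.modify,
      PySem.Dict.getD_insert_self, PySem.Dict.getD_of_not_contains d _ h', List.nil_append]
    exact insert_insert_self_of_not_contains d p.2 _ _ h'

-- a dict with Nodup keys is determined by its keys and getD
theorem items_eq_map_keys {κ ν : Type} [BEq κ] [LawfulBEq κ]
    (d : PySem.Dict κ ν) (d0 : ν) (h : d.keys.Nodup) :
    d.items = d.keys.map (fun k => (k, d.getD k d0)) := by
  conv_lhs => rw [(List.map_id d.items).symm]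
  unfold PySem.Dict.keys
  rw [List.map_map]
  apply List.map_congr_left
  intro p hp
  have hg : d.get? p.1 = some p.2 := PySem.Dict.get?_of_mem_items d (Prod.mk.eta ▸ hp) h
  simp [PySem.Dict.getD, hg]

theorem create_reverse_map_main (cm : List (String × String)) :
    create_reverse_map_py cm = create_reverse_map_py_alt cm := by
  unfold create_reverse_map_py create_reverse_map_py_alt
  have hfun : (fun (reverse_map : PySem.Dict String (List String)) (p : String × String) =>
      if p.2 ≠ "" then
        let rm1 := if reverse_map.contains p.2 then reverse_map
                   else reverse_map.insert p.2 ([] : List String)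
        rm1.modify p.2 [] (fun l => l ++ [p.1])
      else reverse_map)
      = (fun reverse_map p => if p.2 ≠ "" then reverse_map.modify p.2 [] (fun l => l ++ [p.1]) else reverse_map) := by
    funext d p
    by_cases h : p.2 ≠ "" <;> simp only [h, if_false, stepA_eq]
  rw [hfun]
  have hfilt : cm.foldl (fun rm p => if p.2 ≠ "" then rm.modify p.2 [] (fun l => l ++ [p.1]) else rm)
        (PySem.Dict.empty : PySem.Dict String (List String))
      = (cm.filter (fun p => p.2 ≠ "")).foldl (fun rm p => rm.modify p.2 [] (fun l => l ++ [p.1]))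
        PySem.Dict.empty := by
    rw [List.foldl_filter]
    simp only [decide_eq_true_eq]
  rw [hfilt]
  set Lf := cm.filter (fun p => p.2 ≠ "") with hLf
  have hswap : Lf.foldl (fun rm p => rm.modify p.2 [] (fun l => l ++ [p.1])) PySem.Dict.empty
      = (Lf.map Prod.swap).foldl (fun d p => d.modify p.1 [] (fun x => x ++ [p.2])) PySem.Dict.empty := by
    rw [List.foldl_map]
    rfl
  rw [hswap]
  set D := (Lf.map Prod.swap).foldl (fun d p => d.modify p.1 [] (fun x => x ++ [p.2])) PySem.Dict.empty with hD
  have hkeys : D.keys = PySem.Set.update (PySem.Dict.empty : PySem.Dict String (List String)).keys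
      ((Lf.map Prod.swap).map (fun p => p.1)) :=
    PySem.Dict.keys_foldl_modify_key _ _ _ _ _
  have hnodup : D.keys.Nodup := by
    rw [hkeys]; exact PySem.Set.nodup_update _ _ (by simp [PySem.Dict.keys_empty])
  have hgetD : ∀ c, D.getD c [] = ((Lf.map Prod.swap).filter (fun p => p.1 == c)).map (fun p => p.2) := by
    intro c
    have := PySem.Dict.getD_foldl_modify_append (Lf.map Prod.swap)
      (PySem.Dict.empty : PySem.Dict String (List String)) c
    simpa [PySem.Dict.getD_empty] using this
  rw [items_eq_map_keys D [] hnodup, hkeys]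
  have hset : PySem.Set.update (PySem.Dict.empty : PySem.Dict String (List String)).keys
      ((Lf.map Prod.swap).map (fun p => p.1))
      = PySem.List.dedup ((cm.map (fun p => p.2)).filter (fun s => s ≠ "")) := by
    simp only [PySem.Dict.keys_empty, List.map_map, PySem.List.dedup, List.filter_map]
    rfl
  rw [hset]
  apply List.map_congr_left
  intro k hk
  have hkne : k ≠ "" := by
    have hk2 : k ∈ (cm.map (fun p => p.2)).filter (fun s => s ≠ "") := by
      simp only [PySem.List.dedup] at hk
      exact (PySem.Set.mem_ofList _ k).1 hk
    simpa using List.of_mem_filter hk2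
  have h1 : D.getD k [] = (Lf.filter (fun p => p.2 == k)).map (fun p => p.1) := by
    rw [hgetD k, List.filter_map, List.map_map]
    rfl
  have h2 : Lf.filter (fun p => p.2 == k) = cm.filter (fun p => p.2 == k) := by
    rw [hLf, List.filter_filter]
    apply List.filter_congr
    intro a _
    by_cases h : a.2 = k <;> simp [h, hkne]
  simp only [h1, h2]

-- ===== VERDICT (by name: the statement is the Claim_ definition above) =====
theorem create_reverse_map_py_spec : Claim_equal_create_reverse_map_py := by
  intro cm _
  exact create_reverse_map_main cm
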